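-- pv_equiv track=rewrite | github.com/Noor-Nasri/daily-leetcode | 2267-minimum-difference-in-sums-after-removal-of-elements/minimum-difference-in-sums-after-removal-of-elements.py | createSumOfBestElementsArray
-- ===== SOURCE A (Python) =====
-- from heapq import heapify, heappushpop
--
-- def createSumOfBestElementsArray(nums, initRange, heapRange, valMultiplier):
--     # track first sum, then keep storing sum of min k elements.
--     # Likewise, we can get the last n elements and work backwards for max k elements with a minheap
--     # we'll just use negative values to turn minheap to maxheap for the forward case
--
--     curNums = [nums[i] * valMultiplier for i in initRange]
--     curSum = valMultiplier * sum(curNums)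
--     sumPrefixArray = [curSum]
--     heapify(curNums)
--
--     for numInd in heapRange:
--         nextVal = nums[numInd] * valMultiplier
--         if nextVal > curNums[0]:
--             oldVal = heappushpop(curNums, nextVal)
--             realSumDiff = (nextVal - oldVal) * valMultiplier
--             curSum += realSumDiff
--
--         sumPrefixArray.append(curSum)
--
--     return sumPrefixArray
-- ===== SOURCE B (Python) =====
-- import bisect
--
-- def createSumOfBestElementsArray(nums, initRange, heapRange, valMultiplier):
--     # Keep ALL values seen so far in one sorted array; the kept "best k" are
--     # its last k entries, so the running sum is updated branch-free with max().
--     k = len(initRange)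
--     seen = sorted(nums[i] * valMultiplier for i in initRange)
--     s = sum(seen)
--     out = [valMultiplier * s]
--     for j in heapRange:
--         v = nums[j] * valMultiplier
--         s += max(0, v - seen[-k])
--         bisect.insort(seen, v)
--         out.append(valMultiplier * s)
--     return out
-- ===== Notes on version B (the rewrite author's own statement) =====
-- stated objective: alternative
-- what changed: Replaces the fixed-size min-heap with conditional heappushpop by one growing bisect-maintained sorted array of all values seen, whose last k entries are the kept best-k; the running sum is updated branch-free via max(0, v - seen[-k]).
import Mathlib
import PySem

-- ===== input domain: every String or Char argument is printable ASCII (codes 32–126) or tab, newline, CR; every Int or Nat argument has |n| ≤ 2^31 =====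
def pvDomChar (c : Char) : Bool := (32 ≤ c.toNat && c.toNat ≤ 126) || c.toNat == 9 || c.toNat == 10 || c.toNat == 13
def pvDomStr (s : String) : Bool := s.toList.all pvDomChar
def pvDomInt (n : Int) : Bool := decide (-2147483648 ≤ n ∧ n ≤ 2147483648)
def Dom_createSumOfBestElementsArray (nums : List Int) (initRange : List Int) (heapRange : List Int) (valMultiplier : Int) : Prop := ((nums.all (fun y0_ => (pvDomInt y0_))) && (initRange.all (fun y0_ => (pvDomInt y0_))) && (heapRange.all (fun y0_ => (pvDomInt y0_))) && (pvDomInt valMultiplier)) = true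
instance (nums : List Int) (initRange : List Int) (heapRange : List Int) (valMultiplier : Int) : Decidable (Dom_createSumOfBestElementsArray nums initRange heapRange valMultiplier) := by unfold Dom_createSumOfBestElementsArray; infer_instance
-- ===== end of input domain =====

-- B replaces A's fixed-size min-heap (conditional heappushpop) by one growing sorted
-- array of all values seen, updated branch-free with max(); same return value (alternative
-- decomposition, not claimed faster).

-- ===== PORT A =====
-- heapq helpers: pvSiftDown is the binary-heap sift performed by heapq's _siftup
-- (the same heap operation on the same array: move the smaller child up until the
-- item finds its place; exact on A's result, which depends only on the heap's
-- multiset and root minimum).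
-- index of the smaller child of pos
def pvSmallestChild (heap : List Int) (pos : Nat) : Nat :=
  if 2*pos+2 < heap.length ∧ heap.getD (2*pos+2) 0 < heap.getD (2*pos+1) 0
  then 2*pos+2 else 2*pos+1

def pvSiftDown (heap : List Int) (pos : Nat) : List Int :=
  if 2*pos+1 < heap.length then
    if heap.getD (pvSmallestChild heap pos) 0 < heap.getD pos 0 then
      pvSiftDown
        ((heap.set pos (heap.getD (pvSmallestChild heap pos) 0)).set
          (pvSmallestChild heap pos) (heap.getD pos 0))
        (pvSmallestChild heap pos)
    else heap
  else heap
termination_by heap.length - pos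
decreasing_by
  simp only [List.length_set]
  unfold pvSmallestChild
  split <;> omega

-- heapify(x): for i in reversed(range(len(x)//2)): siftdown
def pvHeapify (x : List Int) : List Int :=
  (List.range (x.length / 2)).reverse.foldl (fun h i => pvSiftDown h i) x

-- heappushpop(heap, item): if heap and heap[0] < item: swap item with root and sift
def pvHeappushpop (heap : List Int) (item : Int) : Int × List Int :=
  if heap ≠ [] ∧ heap.getD 0 0 < item then
    (heap.getD 0 0, pvSiftDown (heap.set 0 item) 0)
  else (item, heap)

-- loop body of A (state: curNums, curSum, sumPrefixArray)
def pvStepA (nums : List Int) (valMultiplier : Int)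
    (st : List Int × Int × List Int) (numInd : Int) : List Int × Int × List Int :=
  let nextVal := PySem.List.pyGetD nums numInd 0 * valMultiplier  -- nums[numInd]; IndexError excluded by Pre_
  if st.1.getD 0 0 < nextVal then  -- curNums[0]; IndexError on empty heap excluded by Pre_
    let pp := pvHeappushpop st.1 nextVal
    let curSum := st.2.1 + (nextVal - pp.1) * valMultiplier
    (pp.2, curSum, st.2.2 ++ [curSum])
  else (st.1, st.2.1, st.2.2 ++ [st.2.1])

def createSumOfBestElementsArray (nums : List Int) (initRange : List Int) (heapRange : List Int) (valMultiplier : Int) : List Int :=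
  let curNums := initRange.map (fun i => PySem.List.pyGetD nums i 0 * valMultiplier)
  let curSum := valMultiplier * curNums.sum
  let curNums := pvHeapify curNums
  (heapRange.foldl (pvStepA nums valMultiplier) (curNums, curSum, [curSum])).2.2

-- ===== PORT B =====
-- loop body of B (state: seen, s, out); bisect.insort = List.orderedInsert (· ≤ ·)
-- (insort inserts after equal elements, orderedInsert before them: on equal Int
-- values the resulting lists are identical).
def pvStepB (nums : List Int) (valMultiplier : Int) (k : Nat)
    (st : List Int × Int × List Int) (j : Int) : List Int × Int × List Int :=
  let v := PySem.List.pyGetD nums j 0 * valMultiplier  -- nums[j]; IndexError excluded by Pre_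
  let s := st.2.1 + max 0 (v - PySem.List.pyGetD st.1 (-(k : Int)) 0)  -- seen[-k]; IndexError excluded by Pre_
  (List.orderedInsert (· ≤ ·) v st.1, s, st.2.2 ++ [valMultiplier * s])

def createSumOfBestElementsArray_alt (nums : List Int) (initRange : List Int) (heapRange : List Int) (valMultiplier : Int) : List Int :=
  let k := initRange.length
  let seen := PySem.List.sorted (initRange.map (fun i => PySem.List.pyGetD nums i 0 * valMultiplier)) (fun x => x) false
  let s := seen.sum
  (heapRange.foldl (pvStepB nums valMultiplier k) (seen, s, [valMultiplier * s])).2.2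

-- ===== PRECONDITION & SPEC =====
-- Pre_ excludes exactly the inputs where A raises: an index of initRange/heapRange out of
-- range for nums (IndexError at nums[i]), and a non-empty heapRange with an empty
-- initRange (IndexError at curNums[0]).  B raises on exactly the same inputs.
def Pre_createSumOfBestElementsArray (nums : List Int) (initRange : List Int) (heapRange : List Int) (valMultiplier : Int) : Prop :=
  (initRange = [] → heapRange = []) ∧
  (∀ i ∈ initRange, PySem.Raise.InRange nums.length i) ∧
  (∀ i ∈ heapRange, PySem.Raise.InRange nums.length i)
instance (nums : List Int) (initRange : List Int) (heapRange : List Int) (valMultiplier : Int) : Decidable (Pre_createSumOfBestElementsArray nums initRange heapRange valMultiplier) := by unfold Pre_createSumOfBestElementsArray; infer_instance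

def pvWitness_createSumOfBestElementsArray : List Int × List Int × List Int × Int := ([3, 1, 2], [0, 1], [2], -1)

def Spec_createSumOfBestElementsArray (nums : List Int) (initRange : List Int) (heapRange : List Int) (valMultiplier : Int) (out : List Int) : Prop := out = createSumOfBestElementsArray_alt nums initRange heapRange valMultiplier
instance (nums : List Int) (initRange : List Int) (heapRange : List Int) (valMultiplier : Int) (out : List Int) : Decidable (Spec_createSumOfBestElementsArray nums initRange heapRange valMultiplier out) := by unfold Spec_createSumOfBestElementsArray; infer_instance

-- ===== CLAIM (what is proved, stated in full; the proofs are below) =====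
def Claim_equal_createSumOfBestElementsArray : Prop := ∀ (nums : List Int) (initRange : List Int) (heapRange : List Int) (valMultiplier : Int), Dom_createSumOfBestElementsArray nums initRange heapRange valMultiplier → Pre_createSumOfBestElementsArray nums initRange heapRange valMultiplier → Spec_createSumOfBestElementsArray nums initRange heapRange valMultiplier (createSumOfBestElementsArray nums initRange heapRange valMultiplier)

-- ===== LEMMAS AND PROOFS =====

-- ---- binary-heap index combinatorics ----
def pvParent (j : Nat) : Nat := (j - 1) / 2

def pvIterParent : Nat → Nat → Nat
  | 0, j => j
  | k+1, j => pvIterParent k (pvParent j)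

/-- `j` lies in the subtree rooted at `p`. -/
def pvDesc (p j : Nat) : Prop := ∃ m, pvIterParent m j = p

theorem pvDesc_refl (p : Nat) : pvDesc p p := ⟨0, rfl⟩

theorem pvParent_lt {j : Nat} (h : j ≠ 0) : pvParent j < j := by
  unfold pvParent; omega

theorem pvChild_eq {j : Nat} (h : j ≠ 0) : j = 2 * pvParent j + 1 ∨ j = 2 * pvParent j + 2 := by
  unfold pvParent; omega

theorem pvDesc_step {p j : Nat} (h : pvDesc p (pvParent j)) : pvDesc p j := by
  obtain ⟨m, hm⟩ := h; exact ⟨m+1, hm⟩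

theorem pvDesc_child {p i c : Nat} (h : pvDesc p i) (hc : c = 2*i+1 ∨ c = 2*i+2) : pvDesc p c := by
  apply pvDesc_step
  have : pvParent c = i := by unfold pvParent; omega
  rwa [this]

theorem pvIterParent_add (a b j : Nat) : pvIterParent (b + a) j = pvIterParent a (pvIterParent b j) := by
  induction b generalizing j with
  | zero => simp [pvIterParent]
  | succ b ih =>
    have h : b + 1 + a = (b + a) + 1 := by omega
    rw [h]
    show pvIterParent (b + a) (pvParent j) = pvIterParent a (pvIterParent b (pvParent j))
    exact ih (pvParent j)

theorem pvDesc_trans {p q j : Nat} (h1 : pvDesc p q) (h2 : pvDesc q j) : pvDesc p j := by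
  obtain ⟨a, ha⟩ := h1; obtain ⟨b, hb⟩ := h2
  exact ⟨b + a, by rw [pvIterParent_add, hb, ha]⟩

theorem pvDesc_le {p j : Nat} (h : pvDesc p j) : p ≤ j := by
  obtain ⟨m, hm⟩ := h
  induction m generalizing j with
  | zero => simp [pvIterParent] at hm; omega
  | succ m ih =>
    have := ih (j := pvParent j) hm
    have : pvParent j ≤ j := by unfold pvParent; omega
    omega

theorem pvDesc_parent {s j : Nat} (h : pvDesc s j) (hj : j ≠ s) : pvDesc s (pvParent j) := by
  obtain ⟨m, hm⟩ := h
  cases m with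
  | zero => simp [pvIterParent] at hm; exact absurd hm hj
  | succ m => exact ⟨m, hm⟩

theorem pvDesc_zero (j : Nat) : pvDesc 0 j := by
  induction j using Nat.strong_induction_on with
  | _ j ih =>
    rcases Nat.eq_zero_or_pos j with h | h
    · subst h; exact pvDesc_refl 0
    · exact pvDesc_step (ih _ (pvParent_lt (by omega)))

-- ---- the heap invariant ----
/-- every parent at index ≥ k is ≤ its in-range children. -/
def HeapFrom (l : List Int) (k : Nat) : Prop :=
  ∀ i c, k ≤ i → (c = 2*i+1 ∨ c = 2*i+2) → c < l.length → l.getD i 0 ≤ l.getD c 0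

theorem pv_getD_set_self {l : List Int} {i : Nat} (h : i < l.length) (v : Int) :
    (l.set i v).getD i 0 = v := by
  simp [List.getD_eq_getElem?_getD, h]

theorem pv_getD_set_ne {l : List Int} {i j : Nat} (h : j ≠ i) (v : Int) :
    (l.set i v).getD j 0 = l.getD j 0 := by
  simp [List.getD_eq_getElem?_getD, List.getElem?_set_ne (by omega : i ≠ j)]

theorem pv_getD_eq_getElem {l : List Int} {i : Nat} (h : i < l.length) :
    l.getD i 0 = l[i] := List.getD_eq_getElem l 0 h

theorem pv_count_set {l : List Int} {n : Nat} (h : n < l.length) (v x : Int) :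
    (l.set n v).count x + (if l[n] = x then 1 else 0) = l.count x + (if v = x then 1 else 0) := by
  have e1 := (List.getElem_cons_eraseIdx_perm (l := l) h).count_eq x
  have e2 := (List.set_perm_cons_eraseIdx (l := l) h v).count_eq x
  simp only [List.count_cons] at e1 e2
  by_cases h1 : l[n] = x <;> by_cases h2 : v = x <;> simp [h1, h2] at * <;> omega

theorem pv_swap_perm {l : List Int} {i j : Nat} (hi : i < l.length) (hj : j < l.length)
    (hij : i ≠ j) : ((l.set i (l.getD j 0)).set j (l.getD i 0)).Perm l := by
  rw [List.perm_iff_count]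
  intro x
  have hj' : j < (l.set i (l.getD j 0)).length := by simpa using hj
  have e1 := pv_count_set hi (l.getD j 0) x
  have e2 := pv_count_set hj' (l.getD i 0) x
  have g1 : (l.set i (l.getD j 0))[j] = l[j] := List.getElem_set_ne (h := by omega) ..
  have g2 : l.getD j 0 = l[j] := pv_getD_eq_getElem hj
  have g3 : l.getD i 0 = l[i] := pv_getD_eq_getElem hi
  rw [g1] at e2
  rw [g2] at e1 e2
  rw [g3] at e2
  rw [g2, g3]
  by_cases h1 : l[i] = x <;> by_cases h2 : l[j] = x <;>
    simp only [h1, h2, if_pos, if_neg, if_true, if_false, not_false_iff] at e1 e2 ⊢ <;> omega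

theorem heapChain {l : List Int} {k : Nat} (hh : HeapFrom l k) :
    ∀ {p j : Nat}, k ≤ p → pvDesc p j → j < l.length → l.getD p 0 ≤ l.getD j 0 := by
  intro p j hkp hdesc hj
  obtain ⟨m, hm⟩ := hdesc
  induction m generalizing j with
  | zero => simp [pvIterParent] at hm; subst hm; exact le_refl _
  | succ m ih =>
    by_cases hjp : j = p
    · subst hjp; exact le_refl _
    · have hdp : pvDesc p (pvParent j) := ⟨m, hm⟩
      have hple : p ≤ pvParent j := pvDesc_le hdp
      have hj0 : j ≠ 0 := by
        intro h0; subst h0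
        have : pvParent 0 = 0 := by unfold pvParent; omega
        rw [this] at hple
        omega
      have hpj : pvParent j < j := pvParent_lt hj0
      have h1 : l.getD p 0 ≤ l.getD (pvParent j) 0 := ih (by omega) hm
      have h2 : l.getD (pvParent j) 0 ≤ l.getD j 0 :=
        hh (pvParent j) j (by omega) (pvChild_eq hj0) hj
      exact le_trans h1 h2

-- ---- facts about the smaller child ----
theorem pvSmallestChild_gt (heap : List Int) (pos : Nat) : pos < pvSmallestChild heap pos := by
  unfold pvSmallestChild; split <;> omega

theorem pvSmallestChild_lt {heap : List Int} {pos : Nat} (h1 : 2*pos+1 < heap.length) :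
    pvSmallestChild heap pos < heap.length := by
  unfold pvSmallestChild; split at * <;> omega

theorem pvSmallestChild_childIdx (heap : List Int) (pos : Nat) :
    pvSmallestChild heap pos = 2*pos+1 ∨ pvSmallestChild heap pos = 2*pos+2 := by
  unfold pvSmallestChild; split <;> omega

theorem pvSmallestChild_min {heap : List Int} {pos : Nat} (h1 : 2*pos+1 < heap.length) :
    ∀ c, (c = 2*pos+1 ∨ c = 2*pos+2) → c < heap.length →
      heap.getD (pvSmallestChild heap pos) 0 ≤ heap.getD c 0 := by
  intro c hc hcl
  unfold pvSmallestChild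
  by_cases h : 2*pos+2 < heap.length ∧ heap.getD (2*pos+2) 0 < heap.getD (2*pos+1) 0
  · rw [if_pos h]
    rcases hc with rfl | rfl
    · exact le_of_lt h.2
    · exact le_refl _
  · rw [if_neg h]
    rcases hc with rfl | rfl
    · exact le_refl _
    · have h2 : ¬ heap.getD (2*pos+2) 0 < heap.getD (2*pos+1) 0 := fun hlt => h ⟨hcl, hlt⟩
      omega

-- ---- the main siftDown lemma ----
theorem pvSiftDown_main : ∀ (l : List Int) (pos : Nat), HeapFrom l (pos+1) →
    (pvSiftDown l pos).Perm l ∧ (pvSiftDown l pos).length = l.length ∧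
    HeapFrom (pvSiftDown l pos) pos ∧
    (∀ j, ¬ pvDesc pos j → (pvSiftDown l pos).getD j 0 = l.getD j 0) ∧
    (∀ j, pvDesc pos j → j < l.length →
      ∃ j', pvDesc pos j' ∧ j' < l.length ∧ (pvSiftDown l pos).getD j 0 = l.getD j' 0) := by
  intro heap pos
  induction heap, pos using pvSiftDown.induct with
  | case1 heap pos h1 hcond ih =>
    intro hh
    set s := pvSmallestChild heap pos with hs_def
    have hsl : s < heap.length := pvSmallestChild_lt h1
    have hps : pos < s := pvSmallestChild_gt heap pos
    have hpl : pos < heap.length := by omega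
    have hschild : s = 2*pos+1 ∨ s = 2*pos+2 := pvSmallestChild_childIdx heap pos
    have hdesc_pos_s : pvDesc pos s := pvDesc_child (pvDesc_refl pos) hschild
    set l' := (heap.set pos (heap.getD s 0)).set s (heap.getD pos 0) with hl'_def
    have hl'len : l'.length = heap.length := by simp [hl'_def]
    have gpos : l'.getD pos 0 = heap.getD s 0 := by
      rw [hl'_def, pv_getD_set_ne (by omega), pv_getD_set_self hpl]
    have gs : l'.getD s 0 = heap.getD pos 0 := by
      rw [hl'_def, pv_getD_set_self (by simpa using hsl)]
    have gother : ∀ j, j ≠ pos → j ≠ s → l'.getD j 0 = heap.getD j 0 := by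
      intro j hjp hjs
      rw [hl'_def, pv_getD_set_ne hjs, pv_getD_set_ne hjp]
    have hl'perm : l'.Perm heap := pv_swap_perm hpl hsl (by omega)
    have hh' : HeapFrom l' (s+1) := by
      intro i c hi hc hcl
      rw [hl'len] at hcl
      have hcge : 2*i+1 ≤ c := by omega
      rw [gother i (by omega) (by omega), gother c (by omega) (by omega)]
      exact hh i c (by omega) hc hcl
    have hunfold : pvSiftDown heap pos = pvSiftDown l' s := by
      rw [pvSiftDown, if_pos h1, if_pos hcond]
    obtain ⟨ihperm, ihlen, ihheap, ihfix, ihsub⟩ := ih hh'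
    have hrlen : (pvSiftDown l' s).length = heap.length := by rw [ihlen, hl'len]
    have hnds_pos : ¬ pvDesc s pos := fun hd => by have := pvDesc_le hd; omega
    rw [hunfold]
    refine ⟨ihperm.trans hl'perm, hrlen, ?_, ?_, ?_⟩
    · -- HeapFrom _ pos
      intro i c hi hc hcl
      rw [hrlen] at hcl
      by_cases his : s ≤ i
      · exact ihheap i c his hc (by rwa [ihlen, hl'len])
      · have rpos_or : i = pos ∨ (pos < i ∧ i < s) := by omega
        rcases rpos_or with hip | ⟨hip, his'⟩
        · -- i = pos
          rw [hip] at hc ⊢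
          have rpos : (pvSiftDown l' s).getD pos 0 = heap.getD s 0 := by
            rw [ihfix pos hnds_pos, gpos]
          by_cases hcs : c = s
          · rw [hcs]
            obtain ⟨j', hdj', hj'len, hval⟩ := ihsub s (pvDesc_refl s) (by rw [hl'len]; exact hsl)
            rw [hl'len] at hj'len
            rw [rpos, hval]
            by_cases hj's : j' = s
            · subst hj's; rw [gs]; exact le_of_lt hcond
            · have hsj' : s ≤ j' := pvDesc_le hdj'
              rw [gother j' (by omega) hj's]
              exact heapChain hh (by omega) hdj' hj'len
          · -- the other child
            have hnd : ¬ pvDesc s c := by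
              intro hd
              have h2 := pvDesc_parent hd hcs
              have hpc : pvParent c = pos := by unfold pvParent; omega
              rw [hpc] at h2
              exact hnds_pos h2
            rw [rpos, ihfix c hnd, gother c (by omega) hcs]
            exact pvSmallestChild_min h1 c hc hcl
        · -- pos < i < s
          have hndi : ¬ pvDesc s i := fun hd => by have := pvDesc_le hd; omega
          have hcgt : s < c := by omega
          have hndc : ¬ pvDesc s c := by
            intro hd
            have h2 := pvDesc_parent hd (by omega)
            have hpc : pvParent c = i := by unfold pvParent; omega
            rw [hpc] at h2
            have := pvDesc_le h2; omega
          rw [ihfix i hndi, gother i (by omega) (by omega),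
              ihfix c hndc, gother c (by omega) (by omega)]
          exact hh i c (by omega) hc hcl
    · -- untouched outside the subtree
      intro j hnd
      have hndj : ¬ pvDesc s j := fun hd => hnd (pvDesc_trans hdesc_pos_s hd)
      have hjp : j ≠ pos := fun h => hnd (h ▸ pvDesc_refl pos)
      have hjs : j ≠ s := fun h => hnd (h ▸ hdesc_pos_s)
      rw [ihfix j hndj, gother j hjp hjs]
    · -- values inside the subtree come from the subtree
      intro j hdj hjlen
      by_cases hdsj : pvDesc s j
      · obtain ⟨j'', hd'', hlen'', hval''⟩ := ihsub j hdsj (by rwa [hl'len])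
        rw [hl'len] at hlen''
        by_cases hj''s : j'' = s
        · subst hj''s
          exact ⟨pos, pvDesc_refl pos, hpl, by rw [hval'', gs]⟩
        · have : s ≤ j'' := pvDesc_le hd''
          exact ⟨j'', pvDesc_trans hdesc_pos_s hd'', hlen'',
            by rw [hval'', gother j'' (by omega) hj''s]⟩
      · by_cases hjp : j = pos
        · rw [hjp]
          exact ⟨s, hdesc_pos_s, hsl, by rw [ihfix _ hnds_pos, gpos]⟩
        · have hjs : j ≠ s := fun h => hdsj (h ▸ pvDesc_refl s)
          exact ⟨j, hdj, hjlen, by rw [ihfix j hdsj, gother j hjp hjs]⟩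
  | case2 heap pos h1 hcond =>
    intro hh
    have hunfold : pvSiftDown heap pos = heap := by
      rw [pvSiftDown, if_pos h1, if_neg hcond]
    rw [hunfold]
    refine ⟨List.Perm.refl _, rfl, ?_, fun j _ => rfl, fun j hdj hjlen => ⟨j, hdj, hjlen, rfl⟩⟩
    intro i c hi hc hcl
    by_cases hip : i = pos
    · rw [hip] at hc ⊢
      have h2 : heap.getD pos 0 ≤ heap.getD (pvSmallestChild heap pos) 0 := by omega
      exact le_trans h2 (pvSmallestChild_min h1 c hc hcl)
    · exact hh i c (by omega) hc hcl
  | case3 heap pos h1 =>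
    intro hh
    have hunfold : pvSiftDown heap pos = heap := by
      rw [pvSiftDown, if_neg h1]
    rw [hunfold]
    refine ⟨List.Perm.refl _, rfl, ?_, fun j _ => rfl, fun j hdj hjlen => ⟨j, hdj, hjlen, rfl⟩⟩
    intro i c hi hc hcl
    by_cases hip : i = pos
    · omega
    · exact hh i c (by omega) hc hcl

theorem pvHeapify_aux : ∀ (j : Nat) (l : List Int), HeapFrom l j →
    ((List.range j).reverse.foldl (fun h i => pvSiftDown h i) l).Perm l ∧
    HeapFrom ((List.range j).reverse.foldl (fun h i => pvSiftDown h i) l) 0 := by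
  intro j
  induction j with
  | zero => intro l hh; exact ⟨List.Perm.refl l, hh⟩
  | succ j ih =>
    intro l hh
    rw [List.range_succ, List.reverse_append, List.reverse_singleton, List.singleton_append,
        List.foldl_cons]
    obtain ⟨hp, hlen, hhf, -, -⟩ := pvSiftDown_main l j hh
    obtain ⟨hp2, hh2⟩ := ih (pvSiftDown l j) hhf
    exact ⟨hp2.trans hp, hh2⟩

theorem pvHeapify_base (x : List Int) : HeapFrom x (x.length / 2) := by
  intro i c hi hc hcl; omega

theorem pvHeapify_perm (x : List Int) : (pvHeapify x).Perm x :=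
  (pvHeapify_aux (x.length / 2) x (pvHeapify_base x)).1

theorem pvHeapify_heap (x : List Int) : HeapFrom (pvHeapify x) 0 :=
  (pvHeapify_aux (x.length / 2) x (pvHeapify_base x)).2

theorem pvHeappushpop_spec {heap : List Int} {item : Int} (hne : heap ≠ [])
    (hh : HeapFrom heap 0) (hlt : heap.getD 0 0 < item) :
    pvHeappushpop heap item = (heap.getD 0 0, pvSiftDown (heap.set 0 item) 0) ∧
    (pvSiftDown (heap.set 0 item) 0).Perm (item :: heap.tail) ∧
    HeapFrom (pvSiftDown (heap.set 0 item) 0) 0 ∧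
    (pvSiftDown (heap.set 0 item) 0).length = heap.length := by
  have hh0 : HeapFrom (heap.set 0 item) 1 := by
    intro i c hi hc hcl
    rw [List.length_set] at hcl
    rw [pv_getD_set_ne (by omega), pv_getD_set_ne (by omega)]
    exact hh i c (by omega) hc hcl
  obtain ⟨hp, hlen, hhf, -, -⟩ := pvSiftDown_main (heap.set 0 item) 0 hh0
  have hcons : heap.set 0 item = item :: heap.tail := by
    cases heap with
    | nil => exact absurd rfl hne
    | cons a t => rfl
  refine ⟨by rw [pvHeappushpop, if_pos ⟨hne, hlt⟩], ?_, hhf, by rw [hlen, List.length_set]⟩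
  rw [← hcons]
  exact hp

theorem heap_root_min {l : List Int} (hh : HeapFrom l 0) :
    ∀ j, j < l.length → l.getD 0 0 ≤ l.getD j 0 := by
  intro j hj; exact heapChain hh (Nat.zero_le _) (pvDesc_zero j) hj

-- ---- sorted-array surgery for B's insort ----
theorem insort_drop_of_le {seen : List Int} {v : Int} {t : Nat}
    (ht : t < seen.length) (hv : v ≤ seen.getD t 0) :
    (List.orderedInsert (· ≤ ·) v seen).drop (t+1) = seen.drop t := by
  induction seen generalizing t with
  | nil => simp at ht
  | cons a l ih =>
    rw [List.orderedInsert_cons]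
    by_cases hva : v ≤ a
    · rw [if_pos hva]
      rfl
    · rw [if_neg hva]
      cases t with
      | zero => simp only [List.getD_cons_zero] at hv; exact absurd hv hva
      | succ t' =>
        show (List.orderedInsert (· ≤ ·) v l).drop (t'+1) = l.drop t'
        exact ih (by simpa using ht) (by simpa using hv)

theorem insort_drop_of_gt {seen : List Int} {v : Int} {t : Nat}
    (hs : seen.Pairwise (· ≤ ·)) (ht : t < seen.length) (hv : seen.getD t 0 < v) :
    ((List.orderedInsert (· ≤ ·) v seen).drop (t+1)).Perm (v :: seen.drop (t+1)) := by
  induction seen generalizing t with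
  | nil => simp at ht
  | cons a l ih =>
    rw [List.orderedInsert_cons]
    by_cases hva : v ≤ a
    · exfalso
      have hat : a ≤ (a :: l).getD t 0 := by
        cases t with
        | zero => simp
        | succ t' =>
          simp only [List.getD_cons_succ]
          have ht' : t' < l.length := by simpa using ht
          rw [pv_getD_eq_getElem ht']
          exact (List.pairwise_cons.mp hs).1 _ (List.getElem_mem ht')
      omega
    · rw [if_neg hva]
      cases t with
      | zero =>
        show (List.orderedInsert (· ≤ ·) v l).Perm (v :: l)
        exact List.perm_orderedInsert _ v l
      | succ t' =>
        show ((List.orderedInsert (· ≤ ·) v l).drop (t'+1)).Perm (v :: l.drop (t'+1))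
        exact ih (List.pairwise_cons.mp hs).2 (by simpa using ht) (by simpa using hv)

-- ---- the loop invariant ----
theorem loop_invariant (nums : List Int) (valM : Int) (k : Nat) (hk : 1 ≤ k) :
    ∀ (hr heap seen : List Int) (sB : Int) (acc : List Int),
    heap.length = k → k ≤ seen.length →
    seen.Pairwise (· ≤ ·) →
    heap.Perm (seen.drop (seen.length - k)) →
    HeapFrom heap 0 →
    sB = (seen.drop (seen.length - k)).sum →
    (hr.foldl (pvStepA nums valM) (heap, valM * sB, acc)).2.2 =
      (hr.foldl (pvStepB nums valM k) (seen, sB, acc)).2.2 := by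
  intro hr
  induction hr with
  | nil => intro heap seen sB acc _ _ _ _ _ _; rfl
  | cons i rest ih =>
    intro heap seen sB acc hlen hkle hsort hperm hheap hsum
    set t := seen.length - k with ht_def
    have htlt : t < seen.length := by omega
    have hne : heap ≠ [] := by
      intro h
      have h0 : (0:Nat) = k := by rw [← hlen, h]; rfl
      omega
    -- the heap root equals the t-th element of the sorted array (both are the minimum of the kept multiset)
    have hd0 : (seen.drop t).getD 0 0 = seen.getD t 0 := by
      have h0 : 0 < (seen.drop t).length := by simp; omega
      rw [pv_getD_eq_getElem h0, pv_getD_eq_getElem htlt, List.getElem_drop]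
      simp
    have hmin_seen : ∀ x ∈ seen.drop t, seen.getD t 0 ≤ x := by
      intro x hx
      have pd : (seen.drop t).Pairwise (· ≤ ·) := hsort.sublist (List.drop_sublist t seen)
      cases hdd : seen.drop t with
      | nil => rw [hdd] at hx; simp at hx
      | cons d0 dtail =>
        rw [hdd] at hx hd0 pd
        simp only [List.getD_cons_zero] at hd0
        rw [← hd0]
        rcases List.mem_cons.mp hx with rfl | hx'
        · exact le_refl x
        · exact (List.pairwise_cons.mp pd).1 x hx'
    have hmin_heap : ∀ x ∈ heap, heap.getD 0 0 ≤ x := by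
      intro x hx
      obtain ⟨j, hj, rfl⟩ := List.getElem_of_mem hx
      rw [← pv_getD_eq_getElem hj]
      exact heap_root_min hheap j hj
    have hroot : heap.getD 0 0 = seen.getD t 0 := by
      have h1 : heap.getD 0 0 ∈ heap := by
        have : 0 < heap.length := by omega
        rw [pv_getD_eq_getElem this]; exact List.getElem_mem this
      have h2 : seen.getD t 0 ∈ seen.drop t := by
        have h0 : 0 < (seen.drop t).length := by simp; omega
        rw [← hd0, pv_getD_eq_getElem h0]; exact List.getElem_mem h0
      exact le_antisymm (hmin_heap _ (hperm.mem_iff.mpr h2)) (hmin_seen _ (hperm.mem_iff.mp h1))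
    have hgetk : PySem.List.pyGetD seen (-(k : Int)) 0 = seen.getD t 0 := by
      rw [PySem.List.pyGetD_neg_natCast seen k 0 (by omega) hkle]
      exact (pv_getD_eq_getElem htlt).symm
    set v := PySem.List.pyGetD nums i 0 * valM with hv_def
    -- the tail of the kept multiset matches the tail of the kept block
    obtain ⟨h0, htail, hheq⟩ := List.exists_cons_of_ne_nil hne
    have hdropne : seen.drop t ≠ [] := by
      intro h; have := congrArg List.length h; simp at this; omega
    obtain ⟨d0, dtail, hdeq⟩ := List.exists_cons_of_ne_nil hdropne
    have hh0 : h0 = seen.getD t 0 := by rw [← hroot, hheq]; rfl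
    have hd0' : d0 = seen.getD t 0 := by rw [← hd0, hdeq]; rfl
    have htails : htail.Perm dtail := by
      have hp := hperm
      rw [hheq, hdeq, hh0, hd0'] at hp
      exact hp.cons_inv
    have hdt : dtail = seen.drop (t+1) := by
      have h := List.tail_drop (l := seen) (i := t)
      rw [hdeq] at h
      simpa using h
    have hsum' : sB = seen.getD t 0 + (seen.drop (t+1)).sum := by
      rw [hsum, hdeq, List.sum_cons, hd0', hdt]
    rw [List.foldl_cons, List.foldl_cons]
    by_cases hbr : seen.getD t 0 < v
    · -- A replaces the root, B's max() is positive
      obtain ⟨hpp, hppperm, hppheap, hpplen⟩ :=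
        pvHeappushpop_spec (heap := heap) (item := v) hne hheap (by rw [hroot]; exact hbr)
      set r := pvSiftDown (heap.set 0 v) 0 with hr_def
      set sB' := sB + (v - seen.getD t 0) with hsB'_def
      have eA : pvStepA nums valM (heap, valM * sB, acc) i =
          (r, valM * sB', acc ++ [valM * sB']) := by
        simp only [pvStepA]
        rw [← hv_def]
        rw [if_pos (by rw [hroot]; exact hbr)]
        rw [hpp]
        have e2 : valM * sB + (v - (heap.getD 0 0, r).1) * valM = valM * sB' := by
          simp only [hroot, hsB'_def]; ring
        rw [e2]
      have eB : pvStepB nums valM k (seen, sB, acc) i =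
          (List.orderedInsert (· ≤ ·) v seen, sB', acc ++ [valM * sB']) := by
        simp only [pvStepB]
        rw [← hv_def, hgetk]
        have hmax : max 0 (v - seen.getD t 0) = v - seen.getD t 0 := by omega
        rw [hmax, ← hsB'_def]
      rw [eA, eB]
      have hinslen : (List.orderedInsert (· ≤ ·) v seen).length = seen.length + 1 :=
        List.orderedInsert_length _ seen v
      have hinsdrop : ((List.orderedInsert (· ≤ ·) v seen).drop (t+1)).Perm (v :: seen.drop (t+1)) :=
        insort_drop_of_gt hsort htlt hbr
      have htdrop : (List.orderedInsert (· ≤ ·) v seen).length - k = t + 1 := by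
        rw [hinslen]; omega
      have hrperm : r.Perm ((List.orderedInsert (· ≤ ·) v seen).drop (t+1)) := by
        refine (hppperm.trans ?_).trans hinsdrop.symm
        have htl : heap.tail = htail := by rw [hheq]; rfl
        rw [htl, ← hdt]
        exact htails.cons v
      apply ih
      · rw [hpplen, hlen]
      · omega
      · exact hsort.orderedInsert v seen
      · rw [htdrop]; exact hrperm
      · exact hppheap
      · rw [htdrop]
        have hps : ((List.orderedInsert (· ≤ ·) v seen).drop (t+1)).sum
            = v + (seen.drop (t+1)).sum := by
          rw [hinsdrop.sum_eq, List.sum_cons]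
        rw [hps]
        omega
    · -- A keeps the heap, B's max() is zero
      have eA : pvStepA nums valM (heap, valM * sB, acc) i =
          (heap, valM * sB, acc ++ [valM * sB]) := by
        simp only [pvStepA]
        rw [← hv_def]
        rw [if_neg (by rw [hroot]; exact hbr)]
      have eB : pvStepB nums valM k (seen, sB, acc) i =
          (List.orderedInsert (· ≤ ·) v seen, sB, acc ++ [valM * sB]) := by
        simp only [pvStepB]
        rw [← hv_def, hgetk]
        have hmax : max 0 (v - seen.getD t 0) = 0 := by omega
        rw [hmax, add_zero]
      rw [eA, eB]
      have hinslen : (List.orderedInsert (· ≤ ·) v seen).length = seen.length + 1 :=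
        List.orderedInsert_length _ seen v
      have hinsdrop : (List.orderedInsert (· ≤ ·) v seen).drop (t+1) = seen.drop t :=
        insort_drop_of_le htlt (by omega)
      apply ih
      · exact hlen
      · omega
      · exact hsort.orderedInsert v seen
      · rw [hinslen]
        have he : seen.length + 1 - k = t + 1 := by omega
        rw [he, hinsdrop]; exact hperm
      · exact hheap
      · rw [hinslen]
        have he : seen.length + 1 - k = t + 1 := by omega
        rw [he, hinsdrop]; exact hsum

-- ===== VERDICT (by name: the statement is the Claim_ definition above) =====
theorem createSumOfBestElementsArray_spec : Claim_equal_createSumOfBestElementsArray := by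
  intro nums initRange heapRange valM _hdom hpre
  obtain ⟨hpre1, -, -⟩ := hpre
  unfold Spec_createSumOfBestElementsArray
  simp only [createSumOfBestElementsArray, createSumOfBestElementsArray_alt]
  set vals := initRange.map (fun i => PySem.List.pyGetD nums i 0 * valM) with hvals
  set seen := PySem.List.sorted vals (fun x => x) false with hseen
  have hsp : seen.Perm vals := PySem.List.sorted_perm vals (fun x => x) false
  have hsum : vals.sum = seen.sum := hsp.sum_eq.symm
  rw [hsum]
  by_cases hinit : initRange = []
  · rw [hpre1 hinit]
    rfl
  · have hk : 1 ≤ initRange.length := by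
      cases initRange with
      | nil => exact absurd rfl hinit
      | cons a l => simp
    have hlenvals : vals.length = initRange.length := by rw [hvals, List.length_map]
    have hseenlen : seen.length = initRange.length := by rw [hsp.length_eq, hlenvals]
    have ht0 : seen.drop (seen.length - initRange.length) = seen := by
      have h0 : seen.length - initRange.length = 0 := by omega
      rw [h0, List.drop_zero]
    apply loop_invariant nums valM initRange.length hk heapRange (pvHeapify vals) seen
        seen.sum [valM * seen.sum]
    · rw [(pvHeapify_perm vals).length_eq, hlenvals]
    · omega
    · have h := PySem.List.sorted_pairwise vals (fun x => x)
      simpa using h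
    · rw [ht0]
      exact (pvHeapify_perm vals).trans hsp.symm
    · exact pvHeapify_heap vals
    · rw [ht0]
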